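-- pv_equiv track=rewrite | github.com/savannahbl16/spongebob-meme | spongebob.py | mock
-- ===== SOURCE A (Python) =====
-- def mock(string):
--     index = 0
--     for i in string:
--         if index % 2 == 0:
--             if (ord(i)>=65 and ord(i)<=90) or (ord(i)>=97 and ord(i)<=122):
--                 temp_string1 = string[:index]
--                 temp_string2 = string[index+1:]
--                 temp_list = [temp_string1,temp_string2]
--                 if ord(i)>=97 and ord(i)<=122:
--                     upper = chr(ord(i)-32)
--                 else:
--                     upper = chr(ord(i)+32)
--                 string = upper.join(temp_list)
--         index+=1
--     return string
-- ===== SOURCE B (Python) =====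
-- def _toggle(c):
--     o = ord(c)
--     if 65 <= o <= 90:
--         return chr(o + 32)
--     if 97 <= o <= 122:
--         return chr(o - 32)
--     return c
--
--
-- def mock(string):
--     out = []
--     i = 0
--     n = len(string)
--     while i < n:
--         chunk = string[i:i + 2]
--         out.append(_toggle(chunk[0]) + chunk[1:])
--         i += 2
--     return ''.join(out)
-- ===== Notes on version B (the rewrite author's own statement) =====
-- stated objective: faster
-- what changed: A rebuilds the whole string by slicing and joining at every even letter index; B makes one pass over the string in 2-character chunks, toggling the ASCII case of the first char of each chunk and joining the pieces once.
import Mathlib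
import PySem

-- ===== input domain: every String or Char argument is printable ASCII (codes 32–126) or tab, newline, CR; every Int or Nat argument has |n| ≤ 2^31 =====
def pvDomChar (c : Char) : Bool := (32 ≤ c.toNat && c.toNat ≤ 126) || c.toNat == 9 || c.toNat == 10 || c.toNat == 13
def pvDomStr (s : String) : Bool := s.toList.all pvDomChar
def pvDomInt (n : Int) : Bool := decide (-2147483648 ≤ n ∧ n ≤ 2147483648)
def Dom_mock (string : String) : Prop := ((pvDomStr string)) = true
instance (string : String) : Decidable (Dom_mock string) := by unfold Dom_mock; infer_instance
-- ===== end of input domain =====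

-- B replaces A's per-letter full-string slice-and-join rebuild (quadratic) with one linear
-- pass over 2-character chunks, toggling the first char of each chunk (objective: faster).

-- ===== PORT A =====
-- Python's `for i in string` iterates over the ORIGINAL string even though `string` is
-- reassigned inside the loop; hence the iterator list is a separate argument here.
def mockLoop (iter : List Char) (index : Int) (s : List Char) : List Char :=
  match iter with
  | [] => s
  | i :: rest =>
    let s' :=
      if PySem.Int.mod index 2 = 0 then
        if (65 ≤ i.toNat ∧ i.toNat ≤ 90) ∨ (97 ≤ i.toNat ∧ i.toNat ≤ 122) then
          let temp_string1 := PySem.List.slice s none (some index)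
          let temp_string2 := PySem.List.slice s (some (index + 1)) none
          let upper := if 97 ≤ i.toNat ∧ i.toNat ≤ 122 then Char.ofNat (i.toNat - 32)
                       else Char.ofNat (i.toNat + 32)
          temp_string1 ++ [upper] ++ temp_string2
        else s
      else s
    mockLoop rest (index + 1) s'

def mock (string : String) : String := String.ofList (mockLoop string.toList 0 string.toList)

-- ===== PORT B =====
def toggleAscii (c : Char) : Char :=
  if 65 ≤ c.toNat ∧ c.toNat ≤ 90 then Char.ofNat (c.toNat + 32)
  else if 97 ≤ c.toNat ∧ c.toNat ≤ 122 then Char.ofNat (c.toNat - 32)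
  else c

def mockAltLoop (s : List Char) (i : Nat) : List (List Char) :=
  if i < s.length then
    let chunk := PySem.List.slice s (some (i : Int)) (some ((i : Int) + 2))
    (match chunk with
     | [] => []        -- unreachable: i < s.length makes the chunk nonempty
     | c :: rest => toggleAscii c :: rest) :: mockAltLoop s (i + 2)
  else []
termination_by s.length - i

def mock_alt (string : String) : String := String.ofList (mockAltLoop string.toList 0).flatten

-- ===== PRECONDITION & SPEC =====
def Spec_mock (string : String) (out : String) : Prop := out = mock_alt string
instance (string : String) (out : String) : Decidable (Spec_mock string out) := by unfold Spec_mock; infer_instance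

-- ===== CLAIM (what is proved, stated in full; the proofs are below) =====
def Claim_equal_mock : Prop := ∀ (string : String), Dom_mock string → Spec_mock string (mock string)

-- ===== LEMMAS AND PROOFS =====

-- common specification: char at position k is case-toggled when k is even and it is an ASCII letter
def procA : List Char → Nat → List Char
  | [], _ => []
  | c :: r, k =>
    (if k % 2 = 0 then
       if (65 ≤ c.toNat ∧ c.toNat ≤ 90) ∨ (97 ≤ c.toNat ∧ c.toNat ≤ 122) then
         (if 97 ≤ c.toNat ∧ c.toNat ≤ 122 then Char.ofNat (c.toNat - 32) else Char.ofNat (c.toNat + 32))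
       else c
     else c) :: procA r (k + 1)

theorem toggle_eq (c : Char) :
    toggleAscii c =
      (if (65 ≤ c.toNat ∧ c.toNat ≤ 90) ∨ (97 ≤ c.toNat ∧ c.toNat ≤ 122) then
         (if 97 ≤ c.toNat ∧ c.toNat ≤ 122 then Char.ofNat (c.toNat - 32) else Char.ofNat (c.toNat + 32))
       else c) := by
  unfold toggleAscii
  split_ifs <;> first | rfl | omega

theorem mockLoop_eq_procA (rest done : List Char) :
    mockLoop rest ((done.length : Nat) : Int) (done ++ rest) = done ++ procA rest done.length := by
  induction rest generalizing done with
  | nil => simp [mockLoop, procA]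
  | cons c r ih =>
    rw [mockLoop]
    simp only [procA]
    have hmod : (PySem.Int.mod ((done.length : Nat) : Int) 2 = 0) ↔ done.length % 2 = 0 := by
      rw [show ((2 : Int) = ((2 : Nat) : Int)) from rfl, PySem.Int.mod_natCast]
      omega
    have hslice1 : PySem.List.slice (done ++ c :: r) none (some ((done.length : Nat) : Int)) = done := by
      rw [PySem.List.slice_to_natCast]
      exact List.take_left
    have hslice2 : PySem.List.slice (done ++ c :: r) (some (((done.length : Nat) : Int) + 1)) none = r := by
      have h1 : ((done.length : Nat) : Int) + 1 = (((done.length + 1 : Nat)) : Int) := by push_cast; ring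
      rw [h1, PySem.List.slice_from_natCast]
      rw [show (done ++ c :: r = (done ++ [c]) ++ r) by simp]
      rw [show (done.length + 1 = (done ++ [c]).length) by simp]
      exact List.drop_left
    have key : ∀ y : Char, mockLoop r (((done.length : Nat) : Int) + 1) ((done ++ [y]) ++ r)
        = done ++ y :: procA r (done.length + 1) := by
      intro y
      have h2 : (((done ++ [y]).length : Nat) : Int) = ((done.length : Nat) : Int) + 1 := by
        simp
      have := ih (done ++ [y])
      rw [h2, List.length_append] at this
      simpa [List.append_assoc] using this
    simp only [hmod, hslice1, hslice2]
    split_ifs <;> simpa [List.append_assoc] using key _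

theorem mockAltLoop_flatten (s : List Char) (i : Nat) (hi : i % 2 = 0) :
    (mockAltLoop s i).flatten = procA (s.drop i) i := by
  rw [mockAltLoop]
  by_cases h : i < s.length
  · simp only [if_pos h]
    have hdropne : s.drop i ≠ [] := by
      simp only [ne_eq, List.drop_eq_nil_iff]
      omega
    obtain ⟨c, t, hct⟩ := List.exists_cons_of_ne_nil hdropne
    have hchunk : PySem.List.slice s (some (i : Int)) (some ((i : Int) + 2)) = c :: t.take 1 := by
      have h2 : ((i : Int) + 2) = ((i + 2 : Nat) : Int) := by push_cast; ring
      rw [h2, PySem.List.slice_natCast, hct]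
      simp [show i + 2 - i = 2 by omega]
    have hrec := mockAltLoop_flatten s (i + 2) (by omega)
    have hdrop2 : s.drop (i + 2) = t.drop 1 := by
      have h3 : s.drop (i + 2) = (s.drop i).drop 2 := by
        rw [List.drop_drop]
      rw [h3, hct]
      rfl
    rw [hdrop2] at hrec
    rw [hchunk, hct]
    cases t with
    | nil =>
      simp only [List.take_nil, List.drop_nil] at hrec ⊢
      simp [List.flatten_cons, hrec, procA, hi, ← toggle_eq]
    | cons d t' =>
      simp only [List.drop_succ_cons, List.drop_zero] at hrec
      simp [List.flatten_cons, hrec, procA, hi, ← toggle_eq,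
        show (i + 1) % 2 ≠ 0 by omega, show i + 1 + 1 = i + 2 by omega]
  · have hge : s.length ≤ i := by omega
    simp [if_neg h, List.drop_eq_nil_iff.mpr hge, procA]
termination_by s.length - i
decreasing_by omega

theorem mock_eq (s : String) : mock s = mock_alt s := by
  unfold mock mock_alt
  rw [mockAltLoop_flatten s.toList 0 rfl]
  have := mockLoop_eq_procA s.toList []
  simp only [List.length_nil, Nat.cast_zero, List.nil_append] at this
  rw [List.drop_zero, this]

-- ===== VERDICT (by name: the statement is the Claim_ definition above) =====
theorem mock_spec : Claim_equal_mock := by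
  intro s _
  unfold Spec_mock
  exact mock_eq s
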